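-- pv_equiv track=rewrite | github.com/PerlBeforeSwine/regex-converter | functions.py | convert5
-- ===== SOURCE A (Python) =====
-- def convert5(text):
--     """All case insensitive, all ORs"""
--     # Sanitize input to ensure it's alphanumeric + spaces
--     text = list(text)
--     for index in range(len(text)):
--         if not text[index].isalpha():
--             if not text[index] == " " and not text[index] == "'":
--                 text[index] = '*'
--
--     output = ""
--
--     for char in text:
--         if char != "*":
--             if char.isalpha():
--                 output += "[" + char.upper() + char.lower() + "]"
--             else:
--                 output += char
--
--     output = output.split()
--
--     output = '|'.join(output)
--
--     return output
-- ===== SOURCE B (Python) =====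
-- def convert5(text):
--     """All case insensitive, all ORs"""
--     parts = []
--     started = False
--     for c in text:
--         if c == ' ':
--             started = False
--         elif c.isalpha() or c == "'":
--             if not started:
--                 if parts:
--                     parts.append('|')
--                 started = True
--             if c == "'":
--                 parts.append(c)
--             else:
--                 parts.append('[' + c.upper() + c.lower() + ']')
--     return ''.join(parts)
-- ===== Notes on version B (the rewrite author's own statement) =====
-- stated objective: alternative
-- what changed: A's staged passes (sanitize chars to '*', expand into a string, split it on whitespace, join with pipe) are replaced by one streaming pass over the input with an output accumulator and a word-started flag that emits pipe separators and bracketized letters on the fly, with no intermediate sanitized string, no split and no join.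
import Mathlib
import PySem

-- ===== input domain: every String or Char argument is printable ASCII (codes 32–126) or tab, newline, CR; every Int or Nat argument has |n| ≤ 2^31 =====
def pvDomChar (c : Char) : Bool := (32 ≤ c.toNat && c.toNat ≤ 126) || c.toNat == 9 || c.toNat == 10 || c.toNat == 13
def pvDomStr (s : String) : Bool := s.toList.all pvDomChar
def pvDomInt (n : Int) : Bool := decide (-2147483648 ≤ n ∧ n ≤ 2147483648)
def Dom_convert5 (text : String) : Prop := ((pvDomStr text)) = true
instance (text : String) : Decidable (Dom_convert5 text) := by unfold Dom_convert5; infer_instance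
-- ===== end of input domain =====

-- B replaces A's staged passes (sanitize to '*', expand, split, join) by one streaming pass with an
-- accumulator and a word-started flag that emits pipe separators on the fly (alternative decomposition).

-- ===== PORT A =====
-- the index loop 'text[index] = "*"' rewrites each element in place: ported as a map over the same list
def convert5 (text : String) : String :=
  let textL : List Char := (text.toList).map (fun c =>
    if !(PySem.Chars.isalpha c) then
      if !(c == ' ') && !(c == '\'') then '*' else c
    else c)
  let output : List Char := textL.foldl (fun acc c =>
    if c != '*' then
      if PySem.Chars.isalpha c then
        acc ++ ['['] ++ [PySem.Chars.upperChar c] ++ [PySem.Chars.lowerChar c] ++ [']']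
      else acc ++ [c]
    else acc) []
  String.mk (PySem.Chars.join ['|'] (PySem.Chars.split₀ output))

-- ===== PORT B =====
-- the body of B's single 'for c in text' loop (parts is kept flattened: ''.join(parts) at the end)
def pvStepB (s : List Char × Bool) (c : Char) : List Char × Bool :=
  let parts := s.1
  let started := s.2
  if c == ' ' then (parts, false)
  else if PySem.Chars.isalpha c || c == '\'' then
    let parts := if !started then (if parts.isEmpty then parts else parts ++ ['|']) else parts
    let parts := if c == '\'' then parts ++ [c]
                 else parts ++ ['[', PySem.Chars.upperChar c, PySem.Chars.lowerChar c, ']']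
    (parts, true)
  else (parts, started)

def convert5_alt (text : String) : String :=
  String.mk ((text.toList).foldl pvStepB ([], false)).1

-- ===== PRECONDITION & SPEC =====
def Spec_convert5 (text : String) (out : String) : Prop := out = convert5_alt text
instance (text : String) (out : String) : Decidable (Spec_convert5 text out) := by unfold Spec_convert5; infer_instance

-- ===== CLAIM (what is proved, stated in full; the proofs are below) =====
def Claim_equal_convert5 : Prop := ∀ (text : String), Dom_convert5 text → Spec_convert5 text (convert5 text)

-- ===== LEMMAS AND PROOFS =====

-- the characters A keeps (everything else becomes '*' and is skipped) / B reacts to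
def pvKeep (c : Char) : Bool := PySem.Chars.isalpha c || c == ' ' || c == '\''

-- the per-character expansion both programs apply to kept word characters
def pvE (c : Char) : List Char :=
  if PySem.Chars.isalpha c then
    ['[', PySem.Chars.upperChar c, PySem.Chars.lowerChar c, ']']
  else [c]

def pvExpand (w : List Char) : List Char := w.flatMap pvE

-- the output B has produced when A's split₀.go is in state (cur, acc)
def pvP (acc : List (List Char)) (cur : List Char) : List Char :=
  List.intercalate ['|'] ((acc.reverse).map pvExpand) ++
    (if cur.isEmpty then [] else (if acc.isEmpty then [] else ['|']) ++ pvExpand cur.reverse)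

lemma pvE_ne_nil (c : Char) : pvE c ≠ [] := by
  unfold pvE; split <;> simp

lemma pvToNat_ofNat {n : Nat} (h : n < 55296) : (Char.ofNat n).toNat = n := by
  simp [Char.ofNat, Char.ofNatAux, Nat.isValidChar, h]

lemma pvAlpha_bounds {c : Char} (h : PySem.Chars.isalpha c = true) :
    (65 ≤ c.toNat ∧ c.toNat ≤ 90) ∨ (97 ≤ c.toNat ∧ c.toNat ≤ 122) := by
  simp only [PySem.Chars.isalpha, PySem.Chars.isupper, PySem.Chars.islower, Char.le_def,
    UInt32.le_iff_toNat_le, Bool.or_eq_true, Bool.and_eq_true, decide_eq_true_eq] at h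
  have hA : ('A').val.toNat = 65 := rfl
  have hZ : ('Z').val.toNat = 90 := rfl
  have ha : ('a').val.toNat = 97 := rfl
  have hz : ('z').val.toNat = 122 := rfl
  have hc : c.toNat = c.val.toNat := rfl
  omega

lemma pvNotSpace_of_bounds {c : Char} (h1 : 33 ≤ c.toNat) (h2 : c.toNat ≤ 126) :
    PySem.Chars.isspace c = false := by
  simp only [PySem.Chars.isspace, Bool.or_eq_false_iff, Bool.and_eq_false_iff,
    decide_eq_false_iff_not]
  omega

lemma pvAlpha_not_space {c : Char} (h : PySem.Chars.isalpha c = true) :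
    PySem.Chars.isspace c = false := by
  rcases pvAlpha_bounds h with ⟨h1, h2⟩ | ⟨h1, h2⟩ <;> exact pvNotSpace_of_bounds (by omega) (by omega)

-- A's sanitize-and-skip loop builds exactly the expansion of the kept characters
lemma pvA_loop (l : List Char) (acc : List Char) :
    (l.map (fun c =>
      if !(PySem.Chars.isalpha c) then
        if !(c == ' ') && !(c == '\'') then '*' else c
      else c)).foldl (fun acc c =>
      if c != '*' then
        if PySem.Chars.isalpha c then
          acc ++ ['['] ++ [PySem.Chars.upperChar c] ++ [PySem.Chars.lowerChar c] ++ [']']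
        else acc ++ [c]
      else acc) acc
    = acc ++ (l.filter pvKeep).flatMap pvE := by
  induction l generalizing acc with
  | nil => simp
  | cons c t ih =>
    by_cases hk : pvKeep c = true
    · have hk' := hk
      unfold pvKeep at hk'
      simp only [Bool.or_eq_true, beq_iff_eq] at hk'
      have hsan : (if !(PySem.Chars.isalpha c) then
          if !(c == ' ') && !(c == '\'') then '*' else c else c) = c := by
        rcases hk' with (ha | rfl) | rfl
        · simp [ha]
        · simp
        · simp
      have hstar : (c != '*') = true := by
        rcases hk' with (ha | rfl) | rfl
        · have : c ≠ '*' := by rintro rfl; exact absurd ha (by decide)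
          simpa using this
        · decide
        · decide
      simp only [List.map_cons, List.foldl_cons, hsan, hstar, if_true, List.filter_cons, hk,
        List.flatMap_cons]
      by_cases ha : PySem.Chars.isalpha c = true
      · simp only [ha, if_true]
        rw [ih]
        simp [pvE, ha]
      · simp only [ha, Bool.false_eq_true, if_false]
        rw [ih]
        simp [pvE, ha]
    · have hk3 : PySem.Chars.isalpha c = false ∧ ¬(c = ' ') ∧ ¬(c = '\'') := by
        unfold pvKeep at hk
        simp only [Bool.or_eq_true, beq_iff_eq, not_or, Bool.not_eq_true] at hk
        tauto
      obtain ⟨ha, hsp, hap⟩ := hk3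
      have hsan : (if !(PySem.Chars.isalpha c) then
          if !(c == ' ') && !(c == '\'') then '*' else c else c) = '*' := by
        simp [ha, hsp, hap]
      simp only [List.map_cons, List.foldl_cons, hsan]
      have hss : (('*' : Char) != '*') = false := by decide
      simp only [hss, Bool.false_eq_true, if_false, List.filter_cons,
        Bool.not_eq_true] at *
      simp only [hk, Bool.false_eq_true, if_false]
      exact ih acc

-- B's loop ignores exactly the characters A erases
lemma pvB_filter (l : List Char) (s : List Char × Bool) :
    l.foldl pvStepB s = (l.filter pvKeep).foldl pvStepB s := by
  induction l generalizing s with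
  | nil => rfl
  | cons c t ih =>
    by_cases hk : pvKeep c = true
    · simp only [List.foldl_cons, List.filter_cons, hk, if_true]; exact ih _
    · have hk3 : PySem.Chars.isalpha c = false ∧ ¬(c = ' ') ∧ ¬(c = '\'') := by
        unfold pvKeep at hk
        simp only [Bool.or_eq_true, beq_iff_eq, not_or, Bool.not_eq_true] at hk
        tauto
      obtain ⟨ha, hsp, hap⟩ := hk3
      have hstep : pvStepB s c = s := by
        simp [pvStepB, ha, hsp, hap]
      simp only [List.foldl_cons, List.filter_cons, hk, Bool.false_eq_true, if_false, hstep]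
      exact ih s

lemma pvIntercalate_snoc (s y : List Char) (xs : List (List Char)) :
    List.intercalate s (xs ++ [y])
      = List.intercalate s xs ++ (if xs.isEmpty then [] else s) ++ y := by
  induction xs with
  | nil => simp [List.intercalate]
  | cons a t ih =>
    cases t with
    | nil => simp [List.intercalate, List.intersperse]
    | cons b u =>
      have hcc : ∀ (p q : List Char) (r : List (List Char)),
          List.intercalate s (p :: q :: r) = p ++ s ++ List.intercalate s (q :: r) := by
        intro p q r; simp [List.intercalate, List.intersperse]
      have e1 : (a :: b :: u) ++ [y] = a :: b :: (u ++ [y]) := by simp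
      have e2 : (b :: u) ++ [y] = b :: (u ++ [y]) := by simp
      rw [e1, hcc a b (u ++ [y]), ← e2, ih, hcc a b u]
      simp [List.append_assoc]

lemma pvIntercalate_isEmpty (ws : List (List Char)) (h : ∀ w ∈ ws, w ≠ []) :
    (List.intercalate ['|'] (ws.map pvExpand)).isEmpty = ws.isEmpty := by
  cases ws with
  | nil => simp [List.intercalate]
  | cons w t =>
    have hw : pvExpand w ≠ [] := by
      have hwne : w ≠ [] := h w List.mem_cons_self
      cases w with
      | nil => exact absurd rfl hwne
      | cons x xs =>
        simp only [pvExpand, List.flatMap_cons, ne_eq, List.append_eq_nil_iff, not_and]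
        intro hx; exact absurd hx (pvE_ne_nil x)
    cases t with
    | nil =>
      simp only [List.map_cons, List.map_nil, List.isEmpty_cons]
      have : List.intercalate ['|'] [pvExpand w] = pvExpand w := by
        simp [List.intercalate, List.intersperse]
      rw [this]
      simp [hw]
    | cons b u =>
      have hcc : List.intercalate ['|'] (pvExpand w :: pvExpand b :: u.map pvExpand)
          = pvExpand w ++ ['|'] ++ List.intercalate ['|'] (pvExpand b :: u.map pvExpand) := by
        simp [List.intercalate, List.intersperse]
      simp only [List.map_cons, hcc, List.isEmpty_cons]
      simp [hw]

-- one streaming step of B tracks A's split₀.go state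
lemma pvB_go (m : List Char) (hm : ∀ c ∈ m, pvKeep c = true)
    (cur : List Char) (acc : List (List Char)) (hacc : ∀ w ∈ acc, w ≠ []) :
    (m.foldl pvStepB (pvP acc cur, !cur.isEmpty)).1
      = List.intercalate ['|'] ((PySem.Chars.split₀.go m cur acc).map pvExpand) := by
  induction m generalizing cur acc with
  | nil =>
    simp only [List.foldl_nil, PySem.Chars.split₀.go]
    by_cases hc : cur.isEmpty
    · simp [pvP, hc]
    · simp only [hc, Bool.false_eq_true, if_false]
      have : (cur.reverse :: acc).reverse = acc.reverse ++ [cur.reverse] := by simp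
      rw [this, List.map_append, List.map_singleton, pvIntercalate_snoc]
      simp [pvP, hc, List.isEmpty_map, List.isEmpty_reverse]
  | cons c r ih =>
    have hkc : pvKeep c = true := hm c List.mem_cons_self
    have hr : ∀ x ∈ r, pvKeep x = true := fun x hx => hm x (List.mem_cons_of_mem _ hx)
    simp only [List.foldl_cons]
    by_cases hsp : c = ' '
    · subst hsp
      have hstep : pvStepB (pvP acc cur, !cur.isEmpty) ' ' = (pvP acc cur, false) := by
        simp [pvStepB]
      have hspace : PySem.Chars.isspace ' ' = true := by decide
      rw [hstep]
      simp only [PySem.Chars.split₀.go, hspace, if_true]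
      by_cases hc : cur.isEmpty
      · have hcur : cur = [] := List.isEmpty_iff.mp hc
        subst hcur
        simpa using ih hr [] acc hacc
      · simp only [hc, Bool.false_eq_true, if_false]
        have hP : pvP (cur.reverse :: acc) [] = pvP acc cur := by
          have hrev : (cur.reverse :: acc).reverse = acc.reverse ++ [cur.reverse] := by simp
          simp only [pvP, hrev, List.map_append, List.map_singleton, pvIntercalate_snoc]
          simp [hc, List.isEmpty_map, List.isEmpty_reverse]
        have hacc' : ∀ w ∈ cur.reverse :: acc, w ≠ [] := by
          intro w hw
          rcases List.mem_cons.mp hw with rfl | hw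
          · simpa [List.isEmpty_iff] using hc
          · exact hacc w hw
        have := ih hr [] (cur.reverse :: acc) hacc'
        simpa [hP] using this
    · -- kept and not a space: a letter or an apostrophe
      have hword : PySem.Chars.isalpha c = true ∨ c = '\'' := by
        unfold pvKeep at hkc
        simp only [Bool.or_eq_true, beq_iff_eq] at hkc
        tauto
      have hwordb : (PySem.Chars.isalpha c || c == '\'') = true := by
        rcases hword with h | h <;> simp [h]
      have hnspace : PySem.Chars.isspace c = false := by
        rcases hword with h | rfl
        · exact pvAlpha_not_space h
        · decide
      have hcs : (c == ' ') = false := by simpa using hsp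
      have hE : ∀ parts : List Char,
          (if c == '\'' then parts ++ [c]
           else parts ++ ['[', PySem.Chars.upperChar c, PySem.Chars.lowerChar c, ']'])
            = parts ++ pvE c := by
        intro parts
        by_cases hap : c = '\''
        · subst hap
          have hna : PySem.Chars.isalpha '\'' = false := by decide
          simp [pvE, hna]
        · have ha : PySem.Chars.isalpha c = true := by tauto
          simp [hap, pvE, ha]
      have hstep : pvStepB (pvP acc cur, !cur.isEmpty) c = (pvP acc (c :: cur), true) := by
        by_cases hc : cur.isEmpty
        · have hcur : cur = [] := List.isEmpty_iff.mp hc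
          subst hcur
          have hie := pvIntercalate_isEmpty acc.reverse
            (by intro w hw; exact hacc w (List.mem_reverse.mp hw))
          simp only [pvStepB, hcs, Bool.false_eq_true, if_false, hwordb, if_true, hE]
          simp only [List.isEmpty_nil, Bool.not_true, Bool.not_false]
          have hP0 : pvP acc [] = List.intercalate ['|'] (acc.reverse.map pvExpand) := by
            simp [pvP]
          have hP1 : pvP acc [c] = List.intercalate ['|'] (acc.reverse.map pvExpand) ++
              (if acc.isEmpty then [] else ['|']) ++ pvE c := by
            simp [pvP, pvExpand, List.append_assoc]
          rw [hP0, hP1, hie]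
          by_cases hacc0 : acc.isEmpty
          · simp [List.isEmpty_reverse, hacc0]
          · simp [List.isEmpty_reverse, hacc0, List.append_assoc]
        · have hP : pvP acc (c :: cur) = pvP acc cur ++ pvE c := by
            simp only [pvP, List.isEmpty_cons, hc, Bool.false_eq_true, if_false,
              List.reverse_cons, pvExpand, List.flatMap_append, List.flatMap_cons,
              List.flatMap_nil, List.append_nil]
            simp [List.append_assoc]
          simp only [pvStepB, hcs, Bool.false_eq_true, if_false, hwordb, if_true, hE]
          simp only [hc, Bool.not_false, Bool.not_true, if_false, Bool.false_eq_true]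
          rw [hP]
      rw [hstep]
      simp only [PySem.Chars.split₀.go, hnspace, Bool.false_eq_true, if_false]
      have := ih hr (c :: cur) acc hacc
      simpa using this

-- processing a block of non-space characters just pushes them onto the current word
lemma pvGo_nonspace (ws : List Char) (h : ∀ d ∈ ws, PySem.Chars.isspace d = false)
    (l cur : List Char) (acc : List (List Char)) :
    PySem.Chars.split₀.go (ws ++ l) cur acc
      = PySem.Chars.split₀.go l (ws.reverse ++ cur) acc := by
  induction ws generalizing cur with
  | nil => simp
  | cons d t ih =>
    have hd : PySem.Chars.isspace d = false := h d (List.mem_cons_self)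
    simp only [List.cons_append, PySem.Chars.split₀.go, hd, Bool.false_eq_true, if_false,
      List.reverse_cons, List.append_assoc]
    exact ih (fun e he => h e (List.mem_cons_of_mem _ he)) (d :: cur)

lemma pvUpper_not_space {c : Char} (h : PySem.Chars.isalpha c = true) :
    PySem.Chars.isspace (PySem.Chars.upperChar c) = false := by
  unfold PySem.Chars.upperChar
  split
  · rename_i hl
    simp only [PySem.Chars.islower, Char.le_def, UInt32.le_iff_toNat_le,
      Bool.and_eq_true, decide_eq_true_eq] at hl
    have ha : ('a').val.toNat = 97 := rfl
    have hz : ('z').val.toNat = 122 := rfl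
    have hc : c.toNat = c.val.toNat := rfl
    have hv : c.toNat - 32 < 55296 := by omega
    have ht := pvToNat_ofNat hv
    exact pvNotSpace_of_bounds (by omega) (by omega)
  · exact pvAlpha_not_space h

lemma pvLower_not_space {c : Char} (h : PySem.Chars.isalpha c = true) :
    PySem.Chars.isspace (PySem.Chars.lowerChar c) = false := by
  unfold PySem.Chars.lowerChar
  split
  · rename_i hu
    simp only [PySem.Chars.isupper, Char.le_def, UInt32.le_iff_toNat_le,
      Bool.and_eq_true, decide_eq_true_eq] at hu
    have hA : ('A').val.toNat = 65 := rfl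
    have hZ : ('Z').val.toNat = 90 := rfl
    have hc : c.toNat = c.val.toNat := rfl
    have hv : c.toNat + 32 < 55296 := by omega
    have ht := pvToNat_ofNat hv
    exact pvNotSpace_of_bounds (by omega) (by omega)
  · exact pvAlpha_not_space h

lemma pvE_space {c : Char} (hs : PySem.Chars.isspace c = true) : pvE c = [c] := by
  unfold pvE
  split
  · rename_i ha; rw [pvAlpha_not_space ha] at hs; exact absurd hs (by simp)
  · rfl

lemma pvE_nonspace {c : Char} (hs : PySem.Chars.isspace c = false) :
    ∀ d ∈ pvE c, PySem.Chars.isspace d = false := by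
  unfold pvE
  split
  · rename_i ha
    intro d hd
    simp only [List.mem_cons, List.not_mem_nil, or_false] at hd
    rcases hd with rfl | rfl | rfl | rfl
    · decide
    · exact pvUpper_not_space ha
    · exact pvLower_not_space ha
    · decide
  · intro d hd; simp only [List.mem_singleton] at hd; subst hd; exact hs

lemma pvEmp (cur : List Char) :
    ((cur.reverse.flatMap pvE).reverse).isEmpty = cur.isEmpty := by
  rcases cur with _ | ⟨x, xs⟩
  · simp
  · have hne : (List.flatMap pvE (x :: xs).reverse).reverse ≠ [] := by
      simp only [ne_eq, List.reverse_eq_nil_iff, List.flatMap_eq_nil_iff, not_forall]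
      exact ⟨x, by simp, pvE_ne_nil x⟩
    simp only [List.isEmpty_cons, Bool.eq_false_iff, ne_eq, List.isEmpty_iff]
    exact hne

-- splitting commutes with the character-wise expansion of kept characters
lemma pvGo_comm (l : List Char) (h : ∀ c ∈ l, pvKeep c = true)
    (cur : List Char) (acc : List (List Char)) :
    PySem.Chars.split₀.go (l.flatMap pvE) ((cur.reverse.flatMap pvE).reverse)
        (acc.map (fun w => w.flatMap pvE))
      = (PySem.Chars.split₀.go l cur acc).map (fun w => w.flatMap pvE) := by
  induction l generalizing cur acc with
  | nil =>
    simp only [List.flatMap_nil, PySem.Chars.split₀.go]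
    rw [pvEmp]
    by_cases hc : cur.isEmpty
    · simp [hc]
    · simp only [hc, if_false, Bool.false_eq_true]
      simp [List.map_reverse]
  | cons c t ih =>
    have hk : pvKeep c = true := h c List.mem_cons_self
    have ht : ∀ x ∈ t, pvKeep x = true := fun x hx => h x (List.mem_cons_of_mem _ hx)
    simp only [List.flatMap_cons]
    by_cases hs : PySem.Chars.isspace c = true
    · rw [pvE_space hs]
      simp only [List.singleton_append, PySem.Chars.split₀.go, hs, if_true]
      rw [pvEmp]
      by_cases hc : cur.isEmpty
      · simp only [hc, if_true]
        have := ih ht [] acc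
        simpa using this
      · simp only [hc, if_false, Bool.false_eq_true]
        have := ih ht [] ((cur.reverse :: acc))
        simp only [List.reverse_nil, List.flatMap_nil, List.map_cons] at this ⊢
        rw [← this]
        simp
    · have hs' : PySem.Chars.isspace c = false := by simpa using hs
      rw [pvGo_nonspace (pvE c) (pvE_nonspace hs') _ _ _]
      have hcur : ((pvE c).reverse ++ (cur.reverse.flatMap pvE).reverse)
          = (((c :: cur).reverse.flatMap pvE).reverse) := by
        simp [List.flatMap_append]
      rw [hcur]
      simp only [PySem.Chars.split₀.go, hs', Bool.false_eq_true, if_false]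
      exact ih ht (c :: cur) acc

lemma pvSplit_comm (l : List Char) (h : ∀ c ∈ l, pvKeep c = true) :
    PySem.Chars.split₀ (l.flatMap pvE)
      = (PySem.Chars.split₀ l).map (fun w => w.flatMap pvE) := by
  unfold PySem.Chars.split₀
  have := pvGo_comm l h [] []
  simpa using this

-- ===== VERDICT (by name: the statement is the Claim_ definition above) =====
theorem convert5_spec : Claim_equal_convert5 := by
  intro text _
  unfold Spec_convert5 convert5 convert5_alt
  simp only
  rw [pvA_loop, pvB_filter]
  have hkeep : ∀ c ∈ (text.toList).filter pvKeep, pvKeep c = true := by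
    intro c hc; exact (List.mem_filter.mp hc).2
  rw [List.nil_append, pvSplit_comm _ hkeep]
  have h0 : (([], false) : List Char × Bool)
      = (pvP [] [], !([] : List Char).isEmpty) := by
    simp [pvP, List.intercalate]
  rw [h0, pvB_go _ hkeep [] [] (by intro w hw; exact absurd hw (List.not_mem_nil))]
  rfl
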